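-- pv_equiv track=rewrite | github.com/nrouleau/ThatDungeonLife | dmtools/stat_roll.py | calculate_pointbuy
-- ===== SOURCE A (Python) =====
-- def calculate_pointbuy(stats):
--     # This uses standard point buy
--     # For dealing with <8, it uses "-1" for each value under
--     # For dealing with >15, it adds "2" for each increased value, but adds "3" for an 18
--     pointbuy = []
--     for stat in stats:
--         if(stat <= 0):
--             raise(ValueError("calculate_pointbuy: Stat was {0} but it must be >0!".format(stat)))
--         elif(stat <= 7):
--             pointbuy.append(stat-8)
--         elif(stat <= 13):
--             pointbuy.append(stat-8)
--         elif(stat <= 17):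
--             pointbuy.append(stat-8 + stat-13)
--         elif(stat <= 18):
--             pointbuy.append(stat-8 + stat-13 + stat-17)
--         else:
--             raise(ValueError("calculate_pointbuy: Stat was {0} but it must be <=18!".format(stat)))
--     return pointbuy
-- ===== SOURCE B (Python) =====
-- # Cost table built once by accumulating per-point step costs; the loop only
-- # validates and looks the cost up.
-- def _build_cost_table():
--     table = {1: -7}
--     for s in range(2, 19):
--         step = 1 + (s > 13) + (s > 17)
--         table[s] = table[s - 1] + step
--     return table
--
-- _COST = _build_cost_table()
--
-- def calculate_pointbuy(stats):
--     out = []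
--     for stat in stats:
--         if stat <= 0:
--             raise ValueError("calculate_pointbuy: Stat was {0} but it must be >0!".format(stat))
--         if stat > 18:
--             raise ValueError("calculate_pointbuy: Stat was {0} but it must be <=18!".format(stat))
--         out.append(_COST[stat])
--     return out
-- ===== Notes on version B (the rewrite author's own statement) =====
-- stated objective: alternative
-- what changed: B precomputes a stat->cost dictionary once by accumulating per-point step increments (1, +1 above 13, +1 above 17) and the per-stat loop becomes validation plus a table lookup, replacing A's per-stat if/elif cost cascade.
import Mathlib
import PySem

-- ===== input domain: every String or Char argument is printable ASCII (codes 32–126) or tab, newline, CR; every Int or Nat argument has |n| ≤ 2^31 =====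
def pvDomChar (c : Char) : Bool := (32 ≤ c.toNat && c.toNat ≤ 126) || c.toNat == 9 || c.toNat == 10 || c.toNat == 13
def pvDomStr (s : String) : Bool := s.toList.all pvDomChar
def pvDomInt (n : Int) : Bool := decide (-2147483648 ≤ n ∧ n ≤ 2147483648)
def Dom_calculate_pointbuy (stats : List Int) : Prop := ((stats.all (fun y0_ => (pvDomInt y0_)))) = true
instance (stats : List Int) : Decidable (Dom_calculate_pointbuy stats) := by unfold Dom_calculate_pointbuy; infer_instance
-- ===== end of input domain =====

-- B precomputes a stat→cost table by accumulating step increments and the loop only validates and looks up (objective: alternative).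


-- ===== PORT A =====
-- Literal transliteration of A's loop with its if/elif cost cascade; the two
-- raise branches (stat ≤ 0, stat > 18) lie outside Pre_ and return [] here.
def calculate_pointbuy (stats : List Int) : List Int :=
  match stats with
  | [] => []
  | stat :: rest =>
    if stat ≤ 0 then []                                   -- raise ValueError ">0!"
    else if stat ≤ 7 then (stat - 8) :: calculate_pointbuy rest
    else if stat ≤ 13 then (stat - 8) :: calculate_pointbuy rest
    else if stat ≤ 17 then (stat - 8 + stat - 13) :: calculate_pointbuy rest
    else if stat ≤ 18 then (stat - 8 + stat - 13 + stat - 17) :: calculate_pointbuy rest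
    else []                                               -- raise ValueError "<=18!"

-- ===== PORT B =====
-- _build_cost_table: dict {1: -7}, then for s in range(2,19) add the step cost.
-- table[s-1] is always present (s-1 was inserted on the previous iteration),
-- so Python's KeyError-raising lookup is ported with getD 0 (default unreachable).
def pvCostTable : PySem.Dict Int Int :=
  (PySem.List.pyRange 2 19 1).foldl
    (fun table s =>
      table.insert s
        ((table.get? (s - 1)).getD 0
          + (1 + (if 13 < s then 1 else 0) + (if 17 < s then 1 else 0))))
    (PySem.Dict.empty.insert 1 (-7))

-- B's loop: validate (raises outside Pre_ → []), then table lookup _COST[stat];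
-- the key is present for every validated stat, so getD 0's default is unreachable.
def calculate_pointbuy_alt (stats : List Int) : List Int :=
  match stats with
  | [] => []
  | stat :: rest =>
    if stat ≤ 0 then []                                   -- raise ValueError ">0!"
    else if 18 < stat then []                             -- raise ValueError "<=18!"
    else ((pvCostTable.get? stat).getD 0) :: calculate_pointbuy_alt rest

-- ===== PRECONDITION & SPEC =====
-- Pre_: exactly the inputs on which Python A returns normally (every stat in 1..18).
def Pre_calculate_pointbuy (stats : List Int) : Prop :=
  ∀ s ∈ stats, 0 < s ∧ s ≤ 18
instance (stats : List Int) : Decidable (Pre_calculate_pointbuy stats) := by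
  unfold Pre_calculate_pointbuy; infer_instance
def pvWitness_calculate_pointbuy : List Int := [8, 15, 18, 1]

def Spec_calculate_pointbuy (stats : List Int) (out : List Int) : Prop := out = calculate_pointbuy_alt stats
instance (stats : List Int) (out : List Int) : Decidable (Spec_calculate_pointbuy stats out) := by unfold Spec_calculate_pointbuy; infer_instance

-- ===== CLAIM (what is proved, stated in full; the proofs are below) =====
def Claim_equal_calculate_pointbuy : Prop := ∀ (stats : List Int), Dom_calculate_pointbuy stats → Pre_calculate_pointbuy stats → Spec_calculate_pointbuy stats (calculate_pointbuy stats)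

-- ===== LEMMAS AND PROOFS =====
-- For every in-range stat, the table lookup yields A's cascade value.
theorem cost_lookup_eq (s : Int) (h1 : 0 < s) (h2 : s ≤ 18) :
    (pvCostTable.get? s).getD 0
      = if s ≤ 7 then s - 8
        else if s ≤ 13 then s - 8
        else if s ≤ 17 then s - 8 + s - 13
        else s - 8 + s - 13 + s - 17 := by
  interval_cases s <;> decide

theorem calculate_pointbuy_spec_aux (stats : List Int)
    (h : ∀ s ∈ stats, 0 < s ∧ s ≤ 18) :
    calculate_pointbuy stats = calculate_pointbuy_alt stats := by
  induction stats with
  | nil => rfl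
  | cons stat rest ih =>
    obtain ⟨h1, h2⟩ := h stat (List.mem_cons_self)
    have hr := ih (fun s hs => h s (List.mem_cons_of_mem _ hs))
    simp only [calculate_pointbuy, calculate_pointbuy_alt]
    rw [cost_lookup_eq stat h1 h2]
    split_ifs <;> first | rfl | omega | exact congrArg _ hr

-- ===== VERDICT (by name: the statement is the Claim_ definition above) =====
theorem calculate_pointbuy_spec : Claim_equal_calculate_pointbuy := by
  intro stats _ hpre
  exact calculate_pointbuy_spec_aux stats hpre
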